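-- pv_equiv track=rewrite | github.com/QingqinLi/hm | interview/mianshi.py | find_nums
-- ===== SOURCE A (Python) =====
-- def find_nums(l):
--     d = {}
--     result_list = []
--     for i in l:
--         if i not in result_list:
--             result_list.append(i)
--         if i in d:
--             d[i] += 1
--         else:
--             d[i] = 1
--     return d, result_list
-- ===== SOURCE B (Python) =====
-- def find_nums(l):
--     uniq = list(dict.fromkeys(l))
--     return {x: l.count(x) for x in uniq}, uniq
-- ===== Notes on version B (the rewrite author's own statement) =====
-- stated objective: alternative
-- what changed: B is staged instead of one-pass: it first dedups l (dict.fromkeys) to get the unique elements in first-occurrence order, then builds the count dict by a full l.count(x) scan per unique element, whereas A maintains counts and a membership-tested list incrementally in a single loop.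
import Mathlib
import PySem

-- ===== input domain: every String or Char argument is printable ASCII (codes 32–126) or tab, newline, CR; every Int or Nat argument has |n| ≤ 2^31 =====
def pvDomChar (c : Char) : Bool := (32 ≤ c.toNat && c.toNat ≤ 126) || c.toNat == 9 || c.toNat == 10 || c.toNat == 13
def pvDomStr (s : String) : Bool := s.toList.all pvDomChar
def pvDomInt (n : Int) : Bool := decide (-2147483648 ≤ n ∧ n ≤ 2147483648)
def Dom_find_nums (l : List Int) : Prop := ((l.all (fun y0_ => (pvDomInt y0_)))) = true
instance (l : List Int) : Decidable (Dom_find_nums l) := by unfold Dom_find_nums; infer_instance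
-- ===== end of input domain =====

-- B is staged instead of one-pass: dedup first, then one l.count scan per unique element (alternative decomposition, not faster).

-- ===== PORT A =====
def find_nums (l : List Int) : (List (Int × Int)) × List Int :=
  let st := l.foldl (fun (st : PySem.Dict Int Int × List Int) i =>
    let rl := if st.2.contains i then st.2 else st.2 ++ [i]
    let d := if st.1.contains i then st.1.insert i (st.1.getD i 0 + 1) else st.1.insert i 1
    (d, rl)) (PySem.Dict.empty, [])
  (st.1.items, st.2)

-- ===== PORT B =====
def find_nums_alt (l : List Int) : (List (Int × Int)) × List Int :=
  let uniq := PySem.List.dedup l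
  let d := uniq.foldl (fun (d : PySem.Dict Int Int) x => d.insert x ((l.count x : Int))) PySem.Dict.empty
  (d.items, uniq)

-- ===== PRECONDITION & SPEC =====
def Spec_find_nums (l : List Int) (out : (List (Int × Int)) × List Int) : Prop := out = find_nums_alt l
instance (l : List Int) (out : (List (Int × Int)) × List Int) : Decidable (Spec_find_nums l out) := by unfold Spec_find_nums; infer_instance

-- ===== CLAIM (what is proved, stated in full; the proofs are below) =====
def Claim_equal_find_nums : Prop := ∀ (l : List Int), Dom_find_nums l → Spec_find_nums l (find_nums l)

-- ===== LEMMAS AND PROOFS =====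

-- A's single loop is two independent accumulators; its dict loop is the Counter loop.
theorem find_nums_eq_counter (l : List Int) :
    find_nums l = ((PySem.Dict.counter l).items, PySem.Set.ofList l) := by
  unfold find_nums
  rw [PySem.List.foldl_prod_mk
        (f := fun (d : PySem.Dict Int Int) i =>
          if d.contains i then d.insert i (d.getD i 0 + 1) else d.insert i 1)
        (g := fun (rl : List Int) i => if rl.contains i then rl else rl ++ [i])]
  have hd : l.foldl (fun (d : PySem.Dict Int Int) i =>
      if d.contains i then d.insert i (d.getD i 0 + 1) else d.insert i 1) PySem.Dict.empty
      = PySem.Dict.counter l := by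
    refine Eq.trans (PySem.List.foldl_congr_mem l _
        (fun (d : PySem.Dict Int Int) i => d.insert i (d.getD i 0 + 1)) _ ?_)
      (PySem.Dict.foldl_insert_getD_add_one_eq_counter l)
    intro d i _
    by_cases hc : d.contains i = true
    · simp [hc]
    · have hc' : d.contains i = false := by simpa using hc
      simp [hc', PySem.Dict.getD_of_not_contains d (0 : Int) hc']
  have hs : l.foldl (fun (rl : List Int) i => if rl.contains i then rl else rl ++ [i]) []
      = PySem.Set.ofList l := by
    rw [PySem.Set.ofList_eq_foldl]
    rfl
  simp only [hd, hs]

-- B's fresh-key insert loop lists each unique element with its count.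
theorem find_nums_alt_items (l : List Int) :
    find_nums_alt l = ((PySem.Set.ofList l).map (fun k => (k, (l.count k : Int))), PySem.Set.ofList l) := by
  unfold find_nums_alt
  simp only [PySem.List.dedup_eq_ofList]
  rw [PySem.Dict.items_foldl_insert_fresh (PySem.Set.ofList l) (fun a => a)
        (fun a => (l.count a : Int)) PySem.Dict.empty
        (by intro a _; exact PySem.Dict.contains_empty a)
        (by simp)]
  simp [PySem.Dict.empty]

-- ===== VERDICT (by name: the statement is the Claim_ definition above) =====
theorem find_nums_spec : Claim_equal_find_nums := by
  intro l _
  unfold Spec_find_nums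
  rw [find_nums_eq_counter, find_nums_alt_items, PySem.Dict.items_counter]
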